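-- pv_equiv track=rewrite | github.com/xlturing/machine-learning-journey | seg_bilstm/data_utils.py | sentence_to_ids
-- ===== SOURCE A (Python) =====
-- def sentence_to_ids(sentence, char_to_id, pinyin_dict):
--     sentence.append('<EOS>')
--     sentence.append('<EOS>')
--     sentence.insert(0, '<BOS>')
--     sentence.insert(0, '<BOS>')
--     char_idx = []
--     dict_value = []
--     for i in range(2, len(sentence) - 2):
--         for j in range(-2, 3):
--             if sentence[i + j] in char_to_id:
--                 char_idx.append(char_to_id[sentence[i + j]])
--             else:
--                 char_idx.append(char_to_id['<OOV>'])
--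
--         for j in range(-2, 2):
--             bigram = sentence[i + j] + sentence[i + j + 1]
--             if bigram in char_to_id:
--                 char_idx.append(char_to_id[bigram])
--             else:
--                 char_idx.append(char_to_id['<OOV>'])
--
--             if bigram in pinyin_dict["single"]:
--                 dict_value.append(1)
--                 # dict_value.append(pinyin_dict["single"][bigram])
--             else:
--                 dict_value.append(0)
--                 # dict_value.append("0")
--
--             if bigram in pinyin_dict["head"]:
--                 dict_value.append(1)
--                 # dict_value.append(pinyin_dict["head"][bigram])
--             else:
--                 dict_value.append(0)
--                 # dict_value.append("0")
--
--             if bigram in pinyin_dict["tail"]: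
--                 dict_value.append(1)
--                 # dict_value.append(pinyin_dict["tail"][bigram])
--             else:
--                 dict_value.append(0)
--                 # dict_value.append("0")
--
--             if bigram in pinyin_dict["mid"]:
--                 dict_value.append(1)
--                 # dict_value.append(pinyin_dict["mid"][bigram])
--             else:
--                 dict_value.append(0)
--     return len(sentence) - 4, char_idx, dict_value
-- ===== SOURCE B (Python) =====
-- def sentence_to_ids(sentence, char_to_id, pinyin_dict):
--     # same in-place BOS/EOS padding as the original
--     sentence.insert(0, '<BOS>')
--     sentence.insert(0, '<BOS>')
--     sentence.append('<EOS>')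
--     sentence.append('<EOS>')
--     n = len(sentence)
--     if n == 4:  # nothing to encode
--         return 0, [], []
--
--     def cid(tok):
--         v = char_to_id.get(tok)
--         return v if v is not None else char_to_id['<OOV>']
--
--     # whole-sentence tables, each built in one pass
--     uni = [cid(t) for t in sentence]
--     bigrams = [sentence[k] + sentence[k + 1] for k in range(n - 1)]
--     bi = [cid(b) for b in bigrams]
--     single = pinyin_dict["single"]
--     head = pinyin_dict["head"]
--     tail = pinyin_dict["tail"]
--     mid = pinyin_dict["mid"]
--     flags = [(1 if b in single else 0, 1 if b in head else 0,
--               1 if b in tail else 0, 1 if b in mid else 0) for b in bigrams]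
--
--     char_idx = []
--     dict_value = []
--     for i in range(2, n - 2):
--         char_idx += uni[i - 2:i + 3] + bi[i - 2:i + 2]
--         for f in flags[i - 2:i + 2]:
--             dict_value += f
--     return n - 4, char_idx, dict_value
-- ===== Notes on version B (the rewrite author's own statement) =====
-- stated objective: alternative
-- what changed: Instead of re-looking-up each token/bigram inside the 5-wide and 4-wide inner window loops, B builds three whole-sentence tables (unigram ids, bigram ids, bigram dict-flag tuples) in single passes and then assembles the output per position by extending with slices of those tables, so every dictionary lookup is done once per token/bigram instead of once per window it appears in.
import Mathlib
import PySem

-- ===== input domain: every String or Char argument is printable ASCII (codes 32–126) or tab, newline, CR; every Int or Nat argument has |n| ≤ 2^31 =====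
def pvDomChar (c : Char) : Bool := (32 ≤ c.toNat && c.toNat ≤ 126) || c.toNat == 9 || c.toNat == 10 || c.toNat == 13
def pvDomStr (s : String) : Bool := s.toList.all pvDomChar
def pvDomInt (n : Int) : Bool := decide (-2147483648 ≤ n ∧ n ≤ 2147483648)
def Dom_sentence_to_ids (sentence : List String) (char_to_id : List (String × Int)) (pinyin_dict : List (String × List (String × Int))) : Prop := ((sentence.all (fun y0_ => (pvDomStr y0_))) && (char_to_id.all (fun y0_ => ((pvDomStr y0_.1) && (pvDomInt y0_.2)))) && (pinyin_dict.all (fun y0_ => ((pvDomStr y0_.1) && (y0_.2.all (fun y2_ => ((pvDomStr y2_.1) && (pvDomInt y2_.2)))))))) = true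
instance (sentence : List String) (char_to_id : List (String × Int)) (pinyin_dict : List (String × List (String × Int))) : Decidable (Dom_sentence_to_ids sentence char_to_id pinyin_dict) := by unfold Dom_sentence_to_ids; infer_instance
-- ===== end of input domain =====

-- B replaces the per-window dictionary lookups by three whole-sentence tables built once and
-- sliced per position (alternative decomposition, same results). Both Pythons mutate `sentence`
-- in place identically (BOS/BOS prepended, EOS/EOS appended); the theorems are about the return value.

-- ===== PORT A =====
def sentence_to_ids (sentence : List String) (char_to_id : List (String × Int)) (pinyin_dict : List (String × List (String × Int))) : Int × List Int × List Int :=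
  -- sentence.append('<EOS>') twice, sentence.insert(0,'<BOS>') twice
  let s := "<BOS>" :: "<BOS>" :: ((sentence ++ ["<EOS>"]) ++ ["<EOS>"])
  let cd := PySem.Dict.mk char_to_id
  let pd := PySem.Dict.mk pinyin_dict
  -- Python raises KeyError on a failed dict access; the `.getD … 0` / `.getD … []` defaults are
  -- only reached outside Pre_sentence_to_ids, likewise the `.getD ""` on the always-in-range index.
  let r := (PySem.List.pyRange 2 ((s.length : Int) - 2) 1).foldl (fun acc i =>
    let acc1 := (PySem.List.pyRange (-2) 3 1).foldl (fun ci j =>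
      let tok := (PySem.List.pyGet? s (i + j)).getD ""
      if cd.contains tok then ci ++ [cd.getD tok 0] else ci ++ [cd.getD "<OOV>" 0]) acc.1
    (PySem.List.pyRange (-2) 2 1).foldl (fun acc2 j =>
      let bigram := ((PySem.List.pyGet? s (i + j)).getD "") ++ ((PySem.List.pyGet? s (i + j + 1)).getD "")
      let ci := if cd.contains bigram then acc2.1 ++ [cd.getD bigram 0] else acc2.1 ++ [cd.getD "<OOV>" 0]
      let dv := acc2.2
      let dv := if (PySem.Dict.mk (pd.getD "single" [])).contains bigram then dv ++ [(1 : Int)] else dv ++ [0]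
      let dv := if (PySem.Dict.mk (pd.getD "head" [])).contains bigram then dv ++ [(1 : Int)] else dv ++ [0]
      let dv := if (PySem.Dict.mk (pd.getD "tail" [])).contains bigram then dv ++ [(1 : Int)] else dv ++ [0]
      let dv := if (PySem.Dict.mk (pd.getD "mid" [])).contains bigram then dv ++ [(1 : Int)] else dv ++ [0]
      (ci, dv)) (acc1, acc.2)) ([], [])
  (((s.length : Int) - 4), r.1, r.2)

-- ===== PORT B =====
-- B's lookup helper: `char_to_id.get(tok)` with fallback to `char_to_id['<OOV>']`
def pvCid (char_to_id : List (String × Int)) (tok : String) : Int :=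
  match (PySem.Dict.mk char_to_id).get? tok with
  | some v => v
  | none => (PySem.Dict.mk char_to_id).getD "<OOV>" 0

def sentence_to_ids_alt (sentence : List String) (char_to_id : List (String × Int)) (pinyin_dict : List (String × List (String × Int))) : Int × List Int × List Int :=
  let s := "<BOS>" :: "<BOS>" :: (sentence ++ ["<EOS>", "<EOS>"])
  let m : Int := (s.length : Int)
  if m = 4 then (0, [], []) else
  let uni := s.map (pvCid char_to_id)
  let bigrams := (PySem.List.pyRange 0 (m - 1) 1).map (fun k =>
    ((PySem.List.pyGet? s k).getD "") ++ ((PySem.List.pyGet? s (k + 1)).getD ""))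
  let bi := bigrams.map (pvCid char_to_id)
  let pd := PySem.Dict.mk pinyin_dict
  let single := PySem.Dict.mk (pd.getD "single" [])
  let head := PySem.Dict.mk (pd.getD "head" [])
  let tail := PySem.Dict.mk (pd.getD "tail" [])
  let mid := PySem.Dict.mk (pd.getD "mid" [])
  let flags := bigrams.map (fun b =>
    ((if single.contains b then (1 : Int) else 0), (if head.contains b then (1 : Int) else 0),
     (if tail.contains b then (1 : Int) else 0), (if mid.contains b then (1 : Int) else 0)))
  let r := (PySem.List.pyRange 2 (m - 2) 1).foldl (fun acc i =>
    (acc.1 ++ (PySem.List.slice uni (some (i - 2)) (some (i + 3)) ++ PySem.List.slice bi (some (i - 2)) (some (i + 2))),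
     acc.2 ++ (PySem.List.slice flags (some (i - 2)) (some (i + 2))).flatMap (fun f => [f.1, f.2.1, f.2.2.1, f.2.2.2]))) ([], [])
  (m - 4, r.1, r.2)

-- ===== PRECONDITION & SPEC =====
-- Pre_ excludes exactly the inputs where Python A raises KeyError: a non-empty sentence with one of
-- the four pinyin_dict keys missing, or with some padded token/bigram and '<OOV>' both absent from char_to_id.
def Pre_sentence_to_ids (sentence : List String) (char_to_id : List (String × Int)) (pinyin_dict : List (String × List (String × Int))) : Prop :=
  sentence = [] ∨
  (let pad := "<BOS>" :: "<BOS>" :: (sentence ++ ["<EOS>", "<EOS>"])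
   let cd := PySem.Dict.mk char_to_id
   let pd := PySem.Dict.mk pinyin_dict
   pd.contains "single" ∧ pd.contains "head" ∧ pd.contains "tail" ∧ pd.contains "mid" ∧
   (cd.contains "<OOV>" ∨
    ((∀ t ∈ pad, cd.contains t) ∧ ∀ p ∈ pad.zip pad.tail, cd.contains (p.1 ++ p.2))))
instance (sentence : List String) (char_to_id : List (String × Int)) (pinyin_dict : List (String × List (String × Int))) : Decidable (Pre_sentence_to_ids sentence char_to_id pinyin_dict) := by unfold Pre_sentence_to_ids; infer_instance

def pvWitness_sentence_to_ids : List String × (List (String × Int)) × (List (String × List (String × Int))) :=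
  (["a", "b"], [("<OOV>", 0), ("a", 1), ("b", 2)], [("single", [("ab", 1)]), ("head", []), ("tail", []), ("mid", [])])

def Spec_sentence_to_ids (sentence : List String) (char_to_id : List (String × Int)) (pinyin_dict : List (String × List (String × Int))) (out : Int × List Int × List Int) : Prop := out = sentence_to_ids_alt sentence char_to_id pinyin_dict
instance (sentence : List String) (char_to_id : List (String × Int)) (pinyin_dict : List (String × List (String × Int))) (out : Int × List Int × List Int) : Decidable (Spec_sentence_to_ids sentence char_to_id pinyin_dict out) := by unfold Spec_sentence_to_ids; infer_instance

-- ===== CLAIM (what is proved, stated in full; the proofs are below) =====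
def Claim_equal_sentence_to_ids : Prop := ∀ (sentence : List String) (char_to_id : List (String × Int)) (pinyin_dict : List (String × List (String × Int))), Dom_sentence_to_ids sentence char_to_id pinyin_dict → Pre_sentence_to_ids sentence char_to_id pinyin_dict → Spec_sentence_to_ids sentence char_to_id pinyin_dict (sentence_to_ids sentence char_to_id pinyin_dict)

-- ===== LEMMAS AND PROOFS =====

-- a drop/take window of a list, written as a map over `List.range` (in-bounds, so the default is unused)
lemma pvDropTake {α : Type} (L : List α) (d : α) (a k : Nat) (h : a + k ≤ L.length) :
    (L.drop a).take k = (List.range k).map (fun j => L.getD (a + j) d) := by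
  apply List.ext_getElem
  · simp; omega
  · intro idx h1 h2
    simp only [List.getElem_take, List.getElem_drop, List.getElem_map, List.getElem_range]
    rw [List.getD_eq_getElem L d (by simp at h1; omega)]

lemma pvGetD_map_in {α β : Type} (f : α → β) (L : List α) (a : Nat) (d : β) (d' : α) (h : a < L.length) :
    (L.map f).getD a d = f (L.getD a d') := by
  rw [List.getD_eq_getElem _ _ (by simpa using h), List.getD_eq_getElem _ _ h, List.getElem_map]

lemma pvGet_nat (s : List String) (a : Nat) (h : a < s.length) :
    (PySem.List.pyGet? s (a : Int)).getD "" = s.getD a "" := by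
  simp [PySem.List.pyGet?_natCast, List.getElem?_eq_getElem h]

-- B's lookup helper equals A's contains-then-index pattern
lemma pvCid_eq (c : List (String × Int)) (tok : String) :
    pvCid c tok = if (PySem.Dict.mk c).contains tok then (PySem.Dict.mk c).getD tok 0
                  else (PySem.Dict.mk c).getD "<OOV>" 0 := by
  unfold pvCid
  rw [PySem.Dict.contains_eq_isSome_get?]
  cases h : (PySem.Dict.mk c).get? tok with
  | none => simp
  | some v => simp [PySem.Dict.getD_of_get?_eq_some _ 0 h]

-- push an if with two appends/conses to a common prefix inside the list
lemma pvIfApp {α : Type} (c : Bool) (l la lb : List α) :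
    (if c then l ++ la else l ++ lb) = l ++ (if c then la else lb) := by
  split <;> rfl

lemma pvIfCons {α : Type} (c : Bool) (a : α) (la lb : List α) :
    (if c then a :: la else a :: lb) = a :: (if c then la else lb) := by
  split <;> rfl

lemma pvFoldPair {β : Type} (f g : β → List Int) (l : List β) (c d : List Int) :
    l.foldl (fun acc x => (acc.1 ++ f x, acc.2 ++ g x)) (c, d) = (c ++ l.flatMap f, d ++ l.flatMap g) := by
  induction l generalizing c d with
  | nil => simp
  | cons a l ih => simp [ih, List.flatMap_cons, List.append_assoc]

lemma pvUniCongr (c : List (String × Int)) (s : List String) {z1 z2 : Int} (h : z1 = z2) :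
    pvCid c ((PySem.List.pyGet? s z1).getD "") = pvCid c ((PySem.List.pyGet? s z2).getD "") := by rw [h]

lemma pvBiCongr (c : List (String × Int)) (s : List String) {z1 z2 : Int} (h : z1 = z2) :
    pvCid c ((PySem.List.pyGet? s z1).getD "" ++ (PySem.List.pyGet? s (z1 + 1)).getD "")
      = pvCid c ((PySem.List.pyGet? s z2).getD "" ++ (PySem.List.pyGet? s (z2 + 1)).getD "") := by rw [h]

lemma pvBgCongr (D : PySem.Dict String Int) (s : List String) {z1 z2 : Int} (h : z1 = z2) :
    (if D.contains ((PySem.List.pyGet? s z1).getD "" ++ (PySem.List.pyGet? s (z1 + 1)).getD "") = true then (1 : Int) else 0)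
      = (if D.contains ((PySem.List.pyGet? s z2).getD "" ++ (PySem.List.pyGet? s (z2 + 1)).getD "") = true then (1 : Int) else 0) := by rw [h]

lemma pvIfSingle {α : Type} (c : Bool) (a b : α) :
    (if c then [a] else [b]) = [if c then a else b] := by
  split <;> rfl

-- ===== VERDICT (by name: the statement is the Claim_ definition above) =====
theorem sentence_to_ids_spec : Claim_equal_sentence_to_ids := by
  intro sentence c2i pyd _ _
  unfold Spec_sentence_to_ids
  simp only [sentence_to_ids, sentence_to_ids_alt, List.append_assoc, List.singleton_append]
  set s : List String := "<BOS>" :: "<BOS>" :: (sentence ++ ["<EOS>", "<EOS>"]) with hs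
  simp only [pvIfApp, pvIfCons, pvIfSingle, List.append_assoc, List.cons_append, List.nil_append]
  simp only [← pvCid_eq]
  simp only [PySem.List.foldl_append_singleton_eq_map]
  simp only [pvFoldPair, List.append_assoc]
  simp only [List.nil_append]
  have hlen : s.length = sentence.length + 4 := by simp [hs]
  by_cases h4 : ((s.length : Int)) = 4
  · rw [if_pos h4]
    have hr : PySem.List.pyRange 2 ((s.length : Int) - 2) = [] := by
      rw [show ((s.length : Int) - 2) = 2 by omega]; decide
    rw [hr]
    simp only [List.flatMap_nil]
    rw [show ((s.length : Int) - 4) = 0 by omega]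
  · rw [if_neg h4]
    have h5 : 5 ≤ s.length := by omega
    simp only [Prod.mk.injEq, true_and]
    constructor
    · apply List.flatMap_congr
      intro i hi
      rw [PySem.List.mem_pyRange_one] at hi
      lift i to ℕ using (by omega) with t
      have ht2 : 2 ≤ t := by omega
      have htn : t + 2 < s.length := by omega
      have e5 : PySem.List.pyRange (-2) 3 = [-2, -1, 0, 1, 2] := by decide
      have e4 : PySem.List.pyRange (-2) 2 = [-2, -1, 0, 1] := by decide
      -- unigram slice → explicit lookups
      have huni : PySem.List.slice (List.map (pvCid c2i) s) (some ((t : Int) - 2)) (some ((t : Int) + 3))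
          = (List.range 5).map (fun j => pvCid c2i ((PySem.List.pyGet? s ((t - 2 + j : Nat) : Int)).getD "")) := by
        rw [show ((t : Int) - 2) = ((t - 2 : Nat) : Int) by omega,
            show ((t : Int) + 3) = ((t - 2 + 5 : Nat) : Int) by omega,
            PySem.List.slice_natCast, show (t - 2 + 5) - (t - 2) = 5 by omega,
            pvDropTake _ 0 _ _ (by simp; omega)]
        apply List.map_congr_left
        intro j hj
        rw [List.mem_range] at hj
        rw [pvGetD_map_in _ _ _ _ "" (by omega), ← pvGet_nat _ _ (by omega)]
      -- bigram table → explicit lookups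
      have hbi : PySem.List.slice
            (List.map (pvCid c2i) (List.map (fun k => (PySem.List.pyGet? s k).getD "" ++ (PySem.List.pyGet? s (k + 1)).getD "") (PySem.List.pyRange 0 ((s.length : Int) - 1))))
            (some ((t : Int) - 2)) (some ((t : Int) + 2))
          = (List.range 4).map (fun j => pvCid c2i ((PySem.List.pyGet? s ((t - 2 + j : Nat) : Int)).getD "" ++ (PySem.List.pyGet? s (((t - 2 + j : Nat) : Int) + 1)).getD "")) := by
        rw [show ((s.length : Int) - 1) = ((s.length - 1 : Nat) : Int) by omega,
            PySem.List.pyRange_zero_natCast, List.map_map, List.map_map,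
            show ((t : Int) - 2) = ((t - 2 : Nat) : Int) by omega,
            show ((t : Int) + 2) = ((t - 2 + 4 : Nat) : Int) by omega,
            PySem.List.slice_natCast, show (t - 2 + 4) - (t - 2) = 4 by omega,
            pvDropTake _ 0 _ _ (by simp; omega)]
        apply List.map_congr_left
        intro j hj
        rw [List.mem_range] at hj
        rw [pvGetD_map_in _ _ _ _ 0 (by simp; omega),
            List.getD_eq_getElem _ _ (by simp; omega), List.getElem_range]
        simp [Function.comp]
      rw [huni, hbi, e5, e4, show List.range 5 = [0, 1, 2, 3, 4] from rfl,
          show List.range 4 = [0, 1, 2, 3] from rfl]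
      simp only [List.map_cons, List.map_nil, List.flatMap_cons, List.flatMap_nil,
        List.cons_append, List.nil_append, List.append_nil, List.cons.injEq, and_true]
      exact ⟨pvUniCongr _ _ (by omega), pvUniCongr _ _ (by omega), pvUniCongr _ _ (by omega),
        pvUniCongr _ _ (by omega), pvUniCongr _ _ (by omega), pvBiCongr _ _ (by omega),
        pvBiCongr _ _ (by omega), pvBiCongr _ _ (by omega), pvBiCongr _ _ (by omega)⟩
    · apply List.flatMap_congr
      intro i hi
      rw [PySem.List.mem_pyRange_one] at hi
      lift i to ℕ using (by omega) with t
      have ht2 : 2 ≤ t := by omega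
      have htn : t + 2 < s.length := by omega
      have e4 : PySem.List.pyRange (-2) 2 = [-2, -1, 0, 1] := by decide
      have hfl : PySem.List.slice
            (List.map (fun b => ((if (PySem.Dict.mk ((PySem.Dict.mk pyd).getD "single" [])).contains b = true then (1 : Int) else 0),
                (if (PySem.Dict.mk ((PySem.Dict.mk pyd).getD "head" [])).contains b = true then (1 : Int) else 0),
                (if (PySem.Dict.mk ((PySem.Dict.mk pyd).getD "tail" [])).contains b = true then (1 : Int) else 0),
                (if (PySem.Dict.mk ((PySem.Dict.mk pyd).getD "mid" [])).contains b = true then (1 : Int) else 0)))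
              (List.map (fun k => (PySem.List.pyGet? s k).getD "" ++ (PySem.List.pyGet? s (k + 1)).getD "") (PySem.List.pyRange 0 ((s.length : Int) - 1))))
            (some ((t : Int) - 2)) (some ((t : Int) + 2))
          = (List.range 4).map (fun j =>
              let b := (PySem.List.pyGet? s ((t - 2 + j : Nat) : Int)).getD "" ++ (PySem.List.pyGet? s (((t - 2 + j : Nat) : Int) + 1)).getD ""
              ((if (PySem.Dict.mk ((PySem.Dict.mk pyd).getD "single" [])).contains b = true then (1 : Int) else 0),
                (if (PySem.Dict.mk ((PySem.Dict.mk pyd).getD "head" [])).contains b = true then (1 : Int) else 0),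
                (if (PySem.Dict.mk ((PySem.Dict.mk pyd).getD "tail" [])).contains b = true then (1 : Int) else 0),
                (if (PySem.Dict.mk ((PySem.Dict.mk pyd).getD "mid" [])).contains b = true then (1 : Int) else 0))) := by
        rw [show ((s.length : Int) - 1) = ((s.length - 1 : Nat) : Int) by omega,
            PySem.List.pyRange_zero_natCast, List.map_map, List.map_map,
            show ((t : Int) - 2) = ((t - 2 : Nat) : Int) by omega,
            show ((t : Int) + 2) = ((t - 2 + 4 : Nat) : Int) by omega,
            PySem.List.slice_natCast, show (t - 2 + 4) - (t - 2) = 4 by omega,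
            pvDropTake _ (0, 0, 0, 0) _ _ (by simp; omega)]
        apply List.map_congr_left
        intro j hj
        rw [List.mem_range] at hj
        rw [pvGetD_map_in _ _ _ _ 0 (by simp; omega),
            List.getD_eq_getElem _ _ (by simp; omega), List.getElem_range]
        simp [Function.comp]
      rw [hfl, e4, show List.range 4 = [0, 1, 2, 3] from rfl]
      simp only [List.map_cons, List.map_nil, List.flatMap_cons, List.flatMap_nil,
        List.cons_append, List.nil_append, List.append_nil, List.cons.injEq, and_true]
      refine ⟨?_, ?_, ?_, ?_, ?_, ?_, ?_, ?_, ?_, ?_, ?_, ?_, ?_, ?_, ?_, ?_⟩ <;>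
        exact pvBgCongr _ _ (by omega)
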